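-- pv_equiv track=rewrite | github.com/Tech-Crazy/Codechef | MUFFINS3.py | maxrem
-- ===== SOURCE A (Python) =====
-- def maxrem(n):
-- 	div = 2
-- 	maxdiv = 0
-- 	maxcup = 0
-- 	if n == 2:
-- 		return 2
-- 	while div<=n//2+1:
-- 		if n%div > maxcup:
-- 			maxdiv = div
-- 			maxcup = n%div
-- 		div+=1
-- 	return maxdiv
-- ===== SOURCE B (Python) =====
-- def maxrem(n):
--     if n == 2:
--         return 2
--     if n >= 3:
--         return n // 2 + 1
--     return 0
-- ===== Notes on version B (the rewrite author's own statement) =====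
-- stated objective: faster
-- what changed: Replaces A's linear scan over all divisors 2..n//2+1 with the closed form n//2+1 (the unique remainder-maximizing divisor for n>=3), with 2 for n==2 and 0 for n<=1.
import Mathlib
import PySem

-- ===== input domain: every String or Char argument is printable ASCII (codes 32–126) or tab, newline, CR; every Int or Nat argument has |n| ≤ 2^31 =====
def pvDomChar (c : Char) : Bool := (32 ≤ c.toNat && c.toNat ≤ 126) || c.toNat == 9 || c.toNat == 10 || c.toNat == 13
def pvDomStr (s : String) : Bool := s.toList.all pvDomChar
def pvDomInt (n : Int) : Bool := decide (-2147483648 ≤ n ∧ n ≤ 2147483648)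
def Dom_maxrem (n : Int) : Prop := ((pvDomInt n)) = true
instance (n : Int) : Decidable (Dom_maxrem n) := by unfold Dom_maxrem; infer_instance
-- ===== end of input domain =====

-- B replaces A's linear scan over divisors 2..n//2+1 with the closed form n//2+1 (faster: O(1) vs O(n)).


-- ===== PORT A =====
-- A's while-loop: div counts up from 2 while div ≤ n//2+1, tracking (maxdiv, maxcup).
def maxremLoopA (n div maxdiv maxcup : Int) : Int :=
  if _h : div ≤ PySem.Int.floordiv n 2 + 1 then
    if PySem.Int.mod n div > maxcup then
      maxremLoopA n (div + 1) div (PySem.Int.mod n div)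
    else
      maxremLoopA n (div + 1) maxdiv maxcup
  else maxdiv
termination_by (PySem.Int.floordiv n 2 + 2 - div).toNat
decreasing_by all_goals omega

def maxrem (n : Int) : Int :=
  if n = 2 then 2
  else maxremLoopA n 2 0 0

-- ===== PORT B =====
def maxrem_alt (n : Int) : Int :=
  if n = 2 then 2
  else if n ≥ 3 then PySem.Int.floordiv n 2 + 1
  else 0

-- ===== PRECONDITION & SPEC =====
def Spec_maxrem (n : Int) (out : Int) : Prop := out = maxrem_alt n
instance (n : Int) (out : Int) : Decidable (Spec_maxrem n out) := by unfold Spec_maxrem; infer_instance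

-- ===== CLAIM (what is proved, stated in full; the proofs are below) =====
def Claim_equal_maxrem : Prop := ∀ (n : Int), Dom_maxrem n → Spec_maxrem n (maxrem n)

-- ===== LEMMAS AND PROOFS =====

-- For 0 < d, Python's % agrees with Lean's euclidean %.
theorem pv_mod_pos (n d : Int) (hd : 0 < d) : PySem.Int.mod n d = n % d :=
  PySem.Int.mod_eq_emod_of_pos hd

-- Main loop invariant: with L = n//2+1, n ≥ 3, 2 ≤ div ≤ L, and maxcup < n - L,
-- the loop ends returning L (the last divisor, whose remainder n - L beats all earlier ones).
theorem maxremLoopA_eq (n : Int) (hn : 3 ≤ n) :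
    ∀ (k : Nat) (div maxdiv maxcup : Int),
      (PySem.Int.floordiv n 2 + 1 - div).toNat = k →
      2 ≤ div → div ≤ PySem.Int.floordiv n 2 + 1 →
      0 ≤ maxcup → maxcup < n - (PySem.Int.floordiv n 2 + 1) →
      maxremLoopA n div maxdiv maxcup = PySem.Int.floordiv n 2 + 1 := by
  set L : Int := PySem.Int.floordiv n 2 + 1 with hL
  have hfd : PySem.Int.floordiv n 2 = n / 2 := PySem.Int.floordiv_eq_ediv_of_pos (by omega)
  have hLb : 2 * L - 2 ≤ n ∧ n ≤ 2 * L - 1 := by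
    constructor <;> · rw [hL, hfd]; omega
  intro k
  induction k with
  | zero =>
    intro div maxdiv maxcup hk h2 hle h0 hcup
    have hdiv : div = L := by omega
    subst hdiv
    have hLpos : 0 < L := by omega
    have hmodL : PySem.Int.mod n L = n - L := by
      rw [pv_mod_pos _ _ hLpos]
      have : n % L = (n - L) % L := by
        conv_lhs => rw [show n = (n - L) + L * 1 by ring]
        rw [Int.add_mul_emod_self_left]
      rw [this, Int.emod_eq_of_lt (by omega) (by omega)]
    rw [maxremLoopA]
    simp only [le_refl, dite_true, hmodL, ← hL]
    rw [if_pos (by omega)]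
    rw [maxremLoopA]
    rw [dif_neg (by omega)]
  | succ k ih =>
    intro div maxdiv maxcup hk h2 hle h0 hcup
    have hdlt : div < L := by omega
    have hdpos : 0 < div := by omega
    -- the remainder at this smaller divisor is strictly below n - L
    have hmod : PySem.Int.mod n div < n - L := by
      rw [pv_mod_pos _ _ hdpos]
      have h1 : n % div < div := Int.emod_lt_of_pos n hdpos
      have h2' : 0 ≤ n % div := Int.emod_nonneg n (by omega)
      by_contra hcon
      push_neg at hcon
      -- then div - 1 ≥ n - L ≥ L - 2, so div = L - 1, n = 2L - 2, r = L - 2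
      have hd : div = L - 1 := by omega
      have hnv : n = 2 * L - 2 := by omega
      have hr : n % div = L - 2 := by omega
      -- n = div * (n / div) + n % div; with div = L - 1, q must be 2 hence r = 0
      have hdm : div * (n / div) + n % div = n := Int.ediv_add_emod n div
      have hq : n / div = 2 ∨ n / div ≤ 1 ∨ 3 ≤ n / div := by omega
      have hL3 : 3 ≤ L := by omega
      rcases hq with hq | hq | hq
      · rw [hq] at hdm; omega
      · nlinarith [hdm]
      · nlinarith [hdm]
    rw [maxremLoopA]
    rw [dif_pos (by omega)]
    split
    · exact ih (div + 1) div (PySem.Int.mod n div) (by omega) (by omega) (by omega)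
        (by rw [pv_mod_pos _ _ hdpos]; exact Int.emod_nonneg n (by omega)) (by omega)
    · exact ih (div + 1) maxdiv maxcup (by omega) (by omega) (by omega) h0 hcup

theorem maxremLoopA_small (n : Int) (hn : n ≤ 1) : maxremLoopA n 2 0 0 = 0 := by
  have hfd : PySem.Int.floordiv n 2 = n / 2 := PySem.Int.floordiv_eq_ediv_of_pos (by omega)
  rw [maxremLoopA, dif_neg]
  rw [hfd]
  omega

-- ===== VERDICT (by name: the statement is the Claim_ definition above) =====
theorem maxrem_spec : Claim_equal_maxrem := by
  intro n _
  unfold Spec_maxrem maxrem maxrem_alt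
  by_cases h2 : n = 2
  · simp [h2]
  · rw [if_neg h2, if_neg h2]
    by_cases h3 : 3 ≤ n
    · rw [if_pos (by omega)]
      have hfd : PySem.Int.floordiv n 2 = n / 2 := PySem.Int.floordiv_eq_ediv_of_pos (by omega)
      exact maxremLoopA_eq n h3 _ 2 0 0 rfl (by omega) (by rw [hfd]; omega) le_rfl
        (by rw [hfd]; omega)
    · rw [if_neg (by omega)]
      exact maxremLoopA_small n (by omega)
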